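-- pv_equiv track=rewrite | github.com/Sintrastes/BeautiFTP | main.py | boolListToBin
-- ===== SOURCE A (Python) =====
-- def boolListToBin(x):
--     n = 0
--     i = 0
--     while x != []:
--         value = x.pop()
--         if value == True:
--             n += 2**i
--         i += 1
--     return n
-- ===== SOURCE B (Python) =====
-- def boolListToBin(x):
--     # Horner's method, most-significant bit first (A pops from the back,
--     # B pops from the front); like A, consumes x down to the empty list.
--     n = 0
--     while x != []:
--         b = x.pop(0)
--         n = 2 * n + (1 if b == True else 0)
--     return n
-- ===== Notes on version B (the rewrite author's own statement) =====
-- stated objective: faster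
-- what changed: Replaces A's back-to-front pop with per-bit powers 2**i by Horner's method front-to-back (n = 2*n + bit), never forming a power or bit index.
import Mathlib
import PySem

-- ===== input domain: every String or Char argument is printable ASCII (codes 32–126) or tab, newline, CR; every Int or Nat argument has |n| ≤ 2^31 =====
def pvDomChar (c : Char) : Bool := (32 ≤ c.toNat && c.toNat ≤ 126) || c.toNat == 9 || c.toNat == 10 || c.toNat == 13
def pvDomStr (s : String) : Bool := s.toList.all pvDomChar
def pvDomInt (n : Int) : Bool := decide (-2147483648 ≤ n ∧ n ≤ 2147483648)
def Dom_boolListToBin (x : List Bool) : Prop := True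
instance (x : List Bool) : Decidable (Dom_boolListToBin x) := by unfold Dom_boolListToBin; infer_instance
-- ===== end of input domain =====

-- B computes the same value by Horner's method, MSB-first, instead of summing 2**i per popped bit.
-- Both Pythons mutate x in place down to []; the equivalence proved here is about the return value.
-- ===== PORT A =====
-- while x != []: value = x.pop(); if value == True: n += 2**i; i += 1
def boolListToBinGo (xs : List Bool) (n : Int) (i : Nat) : Int :=
  if h : xs = [] then n
  else boolListToBinGo xs.dropLast (if xs.getLast h then n + 2 ^ i else n) (i + 1)
termination_by xs.length
decreasing_by have := List.length_pos_of_ne_nil h; simp [List.length_dropLast]; omega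

def boolListToBin (x : List Bool) : Int := boolListToBinGo x 0 0

-- ===== PORT B =====
-- while x != []: b = x.pop(0); n = 2*n + (1 if b == True else 0)
def boolListToBinAltGo : List Bool → Int → Int
  | [], n => n
  | b :: rest, n => boolListToBinAltGo rest (2 * n + (if b then 1 else 0))

def boolListToBin_alt (x : List Bool) : Int := boolListToBinAltGo x 0

-- ===== PRECONDITION & SPEC =====
def Spec_boolListToBin (x : List Bool) (out : Int) : Prop := out = boolListToBin_alt x
instance (x : List Bool) (out : Int) : Decidable (Spec_boolListToBin x out) := by unfold Spec_boolListToBin; infer_instance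

-- ===== CLAIM (what is proved, stated in full; the proofs are below) =====
def Claim_equal_boolListToBin : Prop := ∀ (x : List Bool), Dom_boolListToBin x → Spec_boolListToBin x (boolListToBin x)

-- ===== LEMMAS AND PROOFS =====

lemma altGo_append (ys zs : List Bool) (n : Int) :
    boolListToBinAltGo (ys ++ zs) n = boolListToBinAltGo zs (boolListToBinAltGo ys n) := by
  induction ys generalizing n with
  | nil => rfl
  | cons b ys ih => simp [boolListToBinAltGo, ih]

lemma aGo_eq (xs : List Bool) (n : Int) (i : Nat) :
    boolListToBinGo xs n i = n + 2 ^ i * boolListToBinAltGo xs 0 := by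
  induction xs using List.reverseRecOn generalizing n i with
  | nil => simp [boolListToBinGo, boolListToBinAltGo]
  | append_singleton ys b ih =>
      rw [boolListToBinGo]
      simp only [List.getLast_concat, List.dropLast_concat, altGo_append]
      rw [ih]
      cases b <;> simp [boolListToBinAltGo] <;> ring

-- ===== VERDICT (by name: the statement is the Claim_ definition above) =====
theorem boolListToBin_spec : Claim_equal_boolListToBin := by
  intro x _
  unfold Spec_boolListToBin boolListToBin boolListToBin_alt
  rw [aGo_eq]; ring
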